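-- pv_equiv track=rewrite | github.com/markozeman/progressive-chess | Seminar1.py | back2fen
-- ===== SOURCE A (Python) =====
-- def back2fen(pos_2):
--     new_pos = []
--     for row in pos_2:
--         s = ''
--         count = 0
--         j = 0
--         for i in range(len(row)):
--             if i >= j:
--                 if row[i] == '.':
--                     while i + count < len(row) and row[i + count] == '.':
--                         count += 1
--                     s += str(count)
--                     j = i + count
--                 else:
--                     count = 0
--                     s += row[i]
--         new_pos.append(s)
--     return new_pos
-- ===== SOURCE B (Python) =====
-- def back2fen(pos_2):
--     def encode(row):
--         parts = []
--         k = 0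
--         n = len(row)
--         while k < n:
--             ch = row[k]
--             m = k + 1
--             while m < n and row[m] == ch:
--                 m += 1
--             parts.append(str(m - k) if ch == '.' else ch * (m - k))
--             k = m
--         return ''.join(parts)
--     return [encode(row) for row in pos_2]
-- ===== Notes on version B (the rewrite author's own statement) =====
-- stated objective: simpler
-- what changed: A scans every index with an i>=j guard and leftover count/j pointer state, counting only dot runs and copying other characters one at a time; B chunks each row into maximal runs of equal characters and emits str(n) for a '.'-run or ch*n otherwise, joining the pieces.
import Mathlib
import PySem

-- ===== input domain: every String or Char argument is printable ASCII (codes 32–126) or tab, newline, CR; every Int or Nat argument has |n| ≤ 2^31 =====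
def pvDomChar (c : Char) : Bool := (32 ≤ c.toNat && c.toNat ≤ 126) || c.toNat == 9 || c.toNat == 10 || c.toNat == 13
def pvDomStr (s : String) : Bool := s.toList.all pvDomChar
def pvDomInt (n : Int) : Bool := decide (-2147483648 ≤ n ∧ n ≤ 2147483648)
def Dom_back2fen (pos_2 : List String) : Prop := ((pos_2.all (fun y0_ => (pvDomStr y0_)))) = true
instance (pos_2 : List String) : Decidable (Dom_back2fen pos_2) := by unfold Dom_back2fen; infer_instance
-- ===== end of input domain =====

-- B replaces A's guarded per-index scan (i ≥ j pointer bookkeeping) by a chunk-driven pass over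
-- maximal runs of equal characters, emitting str(n) for '.'-runs and ch*n otherwise (objective: simpler).

-- ===== PORT A =====
-- inner `while i + count < len(row) and row[i + count] == '.'` of A
def back2fenWhile (l : List Char) (i count : Nat) : Nat :=
  if h : i + count < l.length then
    if l[i + count] = '.' then back2fenWhile l i (count + 1) else count
  else count
termination_by l.length - (i + count)
decreasing_by omega

-- outer `for i in range(len(row))` of A, with state (s, count, j)
def back2fenLoop (l : List Char) (i : Nat) (s : List Char) (count j : Nat) : List Char :=
  if hi : i < l.length then
    if i ≥ j then
      if l[i] = '.' then
        let c := back2fenWhile l i count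
        back2fenLoop l (i + 1) (s ++ PySem.Int.toChars (Int.ofNat c)) c (i + c)
      else
        back2fenLoop l (i + 1) (s ++ [l[i]]) 0 j
    else back2fenLoop l (i + 1) s count j
  else s
termination_by l.length - i
decreasing_by all_goals omega

def back2fen (pos_2 : List String) : List String :=
  pos_2.map (fun row => String.mk (back2fenLoop row.toList 0 [] 0 0))

-- ===== PORT B =====
-- one maximal run of equal characters per step: emit str(n) for '.'-runs, ch*n otherwise
def back2fenRuns (l : List Char) : List Char :=
  match l with
  | [] => []
  | c :: t =>
    let run := t.takeWhile (fun x => x = c)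
    (if c = '.' then PySem.Int.toChars (Int.ofNat (run.length + 1))
     else List.replicate (run.length + 1) c)
      ++ back2fenRuns (t.dropWhile (fun x => x = c))
termination_by l.length
decreasing_by simpa using Nat.lt_succ_of_le (t.length_dropWhile_le _)

def back2fen_alt (pos_2 : List String) : List String :=
  pos_2.map (fun row => String.mk (back2fenRuns row.toList))

-- ===== PRECONDITION & SPEC =====
def Spec_back2fen (pos_2 : List String) (out : List String) : Prop := out = back2fen_alt pos_2
instance (pos_2 : List String) (out : List String) : Decidable (Spec_back2fen pos_2 out) := by unfold Spec_back2fen; infer_instance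

-- ===== CLAIM (what is proved, stated in full; the proofs are below) =====
def Claim_equal_back2fen : Prop := ∀ (pos_2 : List String), Dom_back2fen pos_2 → Spec_back2fen pos_2 (back2fen pos_2)

-- ===== LEMMAS AND PROOFS =====

theorem drop_len_takeWhile {α : Type} (t : List α) (p : α → Bool) :
    t.drop (t.takeWhile p).length = t.dropWhile p := by
  induction t with
  | nil => simp
  | cons a t ih =>
    by_cases h : p a = true
    · simp [List.takeWhile_cons, List.dropWhile_cons, h, ih]
    · simp [List.takeWhile_cons, List.dropWhile_cons, h]

theorem head_dropWhile_false {α : Type} (p : α → Bool) :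
    ∀ (t : List α) (x : α) (xs : List α), t.dropWhile p = x :: xs → p x = false := by
  intro t
  induction t with
  | nil => intro x xs h; simp at h
  | cons a t ih =>
    intro x xs h
    by_cases ha : p a = true
    · rw [List.dropWhile_cons, if_pos ha] at h; exact ih x xs h
    · rw [List.dropWhile_cons, if_neg ha] at h
      cases h; simpa using ha

-- A's inner while counts the '.'-run starting at i + count
theorem back2fenWhile_eq (l : List Char) (i count : Nat) :
    back2fenWhile l i count = count + ((l.drop (i + count)).takeWhile (fun x => x = '.')).length := by
  rw [back2fenWhile]
  by_cases h : i + count < l.length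
  · rw [dif_pos h]
    by_cases hd : l[i + count] = '.'
    · rw [if_pos hd, back2fenWhile_eq l i (count + 1), ← Nat.add_assoc]
      rw [List.drop_eq_getElem_cons h]
      simp only [List.takeWhile_cons, hd, decide_true, if_true, List.length_cons]
      omega
    · rw [if_neg hd, List.drop_eq_getElem_cons h]
      simp [List.takeWhile_cons, hd]
  · rw [dif_neg h]
    rw [List.drop_eq_nil_of_le (by omega)]
    simp
termination_by l.length - (i + count)
decreasing_by omega

-- B's run recursion passes non-'.' characters one at a time
theorem back2fenRuns_cons_ne (c : Char) (t : List Char) (hc : ¬ c = '.') :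
    back2fenRuns (c :: t) = c :: back2fenRuns t := by
  cases t with
  | nil => simp [back2fenRuns, hc]
  | cons d t2 =>
    by_cases hd : d = c
    · subst hd
      rw [back2fenRuns, back2fenRuns]
      simp [hc, List.takeWhile_cons, List.dropWhile_cons, List.replicate_succ]
    · rw [back2fenRuns]
      simp [hc, List.takeWhile_cons, List.dropWhile_cons, hd]

-- while i < j the outer loop only advances i
theorem back2fenLoop_skip (l : List Char) (i : Nat) (s : List Char) (count j : Nat) (h : i ≤ j) :
    back2fenLoop l i s count j = back2fenLoop l j s count j := by
  rcases Nat.eq_or_lt_of_le h with rfl | hlt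
  · rfl
  · rw [back2fenLoop]
    by_cases hi : i < l.length
    · rw [dif_pos hi, if_neg (by omega)]
      exact back2fenLoop_skip l (i + 1) s count j hlt
    · rw [dif_neg hi, back2fenLoop, dif_neg (by omega)]
termination_by j - i
decreasing_by omega

-- main invariant: once every index below i is processed, the loop appends B's encoding of the suffix
theorem back2fenLoop_eq (l : List Char) (n i j : Nat) (s : List Char) (count : Nat)
    (hn : l.length - i ≤ n) (hj : j ≤ i)
    (hc : ∀ h : i < l.length, l[i] = '.' → count = 0) :
    back2fenLoop l i s count j = s ++ back2fenRuns (l.drop i) := by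
  induction n generalizing i j s count with
  | zero =>
    rw [back2fenLoop, dif_neg (by omega), List.drop_eq_nil_of_le (by omega)]
    simp [back2fenRuns]
  | succ n ih =>
    by_cases hi : i < l.length
    · rw [back2fenLoop, dif_pos hi, if_pos hj]
      have hdrop : l.drop i = l[i] :: l.drop (i + 1) := List.drop_eq_getElem_cons hi
      by_cases hd : l[i] = '.'
      · rw [if_pos hd]
        have hcount : count = 0 := hc hi hd
        subst hcount
        have hw : back2fenWhile l i 0 =
            ((l.drop (i + 1)).takeWhile (fun x => x = '.')).length + 1 := by
          rw [back2fenWhile_eq]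
          rw [Nat.add_zero, hdrop]
          simp [hd]
        set k := ((l.drop (i + 1)).takeWhile (fun x => x = '.')).length with hk
        have hdw : l.drop (i + 1 + k) = (l.drop (i + 1)).dropWhile (fun x => x = '.') := by
          rw [← drop_len_takeWhile (l.drop (i + 1)) (fun x => decide (x = '.'))]
          rw [← List.drop_drop]
        rw [hw, back2fenLoop_skip l (i + 1) _ _ _ (by omega)]
        have hstep : i + (k + 1) = i + 1 + k := by omega
        have hc' : ∀ h2 : i + (k + 1) < l.length, l[i + (k + 1)] = '.' → k + 1 = 0 := by
          intro h2 hdot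
          exfalso
          have h3 : i + 1 + k < l.length := by omega
          have hhead : l.drop (i + 1 + k) = l[i + 1 + k] :: l.drop (i + 1 + k + 1) :=
            List.drop_eq_getElem_cons h3
          rw [hdw] at hhead
          have := head_dropWhile_false (fun x => decide (x = '.')) _ _ _ hhead
          simp at this
          apply this
          have : l[i + 1 + k] = l[i + (k + 1)] := by congr 1; omega
          rw [this, hdot]
        rw [ih (i + (k + 1)) (i + (k + 1)) _ (k + 1) (by omega) (le_refl _) hc']
        rw [hdrop, back2fenRuns]
        simp only [hd]
        rw [hstep, hdw]
        simp only [hd, if_true, List.append_assoc]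
        rw [hk]
      · rw [if_neg hd]
        rw [ih (i + 1) j _ 0 (by omega) (by omega) (fun _ _ => rfl)]
        rw [hdrop, back2fenRuns_cons_ne _ _ hd]
        simp
    · rw [back2fenLoop, dif_neg hi, List.drop_eq_nil_of_le (by omega)]
      simp [back2fenRuns]

-- ===== VERDICT (by name: the statement is the Claim_ definition above) =====
theorem back2fen_spec : Claim_equal_back2fen := by
  intro pos_2 _
  unfold Spec_back2fen back2fen back2fen_alt
  refine List.map_congr_left fun row _ => ?_
  have := back2fenLoop_eq row.toList row.toList.length 0 0 [] 0 (by omega) (by omega)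
    (fun _ _ => rfl)
  have h2 : back2fenLoop row.toList 0 [] 0 0 = back2fenRuns row.toList := by simpa using this
  exact congrArg String.mk h2
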